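-- pv_equiv track=rewrite | github.com/imda-lionelteo/process_check_app | backend/pdf_generator.py | compile_results
-- ===== SOURCE A (Python) =====
-- def compile_results(json_data):
--     """
--     Compiles the results from JSON data into overall statistics and principle-specific statistics.
--
--     Args:
--         json_data: The JSON data containing process information.
--
--     Returns:
--         A tuple containing overall statistics and principle-specific statistics.
--     """
--     overall_yes_count = 0
--     overall_no_count = 0
--     overall_na_count = 0
--
--     principle_stats = {}
--
--     for outcome_id, processes in json_data.items():
--         for process_id, process_info in processes.items():
--             principle_key = process_info.get(
--                 "principle_key", "Unknown Principle"
--             ).strip()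
--
--             if principle_key not in principle_stats:
--                 principle_stats[principle_key] = {"Yes": 0, "No": 0, "N/A": 0}
--
--             implementation_status = process_info.get("implementation", "N/A")
--             if implementation_status == "Yes":
--                 overall_yes_count += 1
--                 principle_stats[principle_key]["Yes"] += 1
--             elif implementation_status == "No":
--                 overall_no_count += 1
--                 principle_stats[principle_key]["No"] += 1
--             elif implementation_status == "N/A":
--                 overall_na_count += 1
--                 principle_stats[principle_key]["N/A"] += 1
--
--     overall_stats = {
--         "Total Yes": overall_yes_count,
--         "Total No": overall_no_count,
--         "Total N/A": overall_na_count,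
--     }
--
--     return overall_stats, principle_stats
-- ===== SOURCE B (Python) =====
-- def compile_results(json_data):
--     """Staged pipeline: flatten to (principle, status) records, count (principle,
--     status) pairs once, then assemble both result dicts by lookup."""
--     records = [
--         (info.get("principle_key", "Unknown Principle").strip(),
--          info.get("implementation", "N/A"))
--         for processes in json_data.values()
--         for info in processes.values()
--     ]
--     pair_counts = {}
--     for rec in records:
--         pair_counts[rec] = pair_counts.get(rec, 0) + 1
--     order = []
--     for pk, _ in records:
--         if pk not in order:
--             order.append(pk)
--     principle_stats = {
--         pk: {s: pair_counts.get((pk, s), 0) for s in ("Yes", "No", "N/A")}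
--         for pk in order
--     }
--     overall_stats = {
--         "Total Yes": sum(1 for _, s in records if s == "Yes"),
--         "Total No": sum(1 for _, s in records if s == "No"),
--         "Total N/A": sum(1 for _, s in records if s == "N/A"),
--     }
--     return overall_stats, principle_stats
-- ===== Notes on version B (the rewrite author's own statement) =====
-- stated objective: alternative
-- what changed: Instead of threading nested mutable counter dicts through one nested loop, B flattens the input to a list of (principle, status) records, counts (principle, status) pairs in one flat Counter-style dict, records first-appearance order of principles, and assembles overall and per-principle stats afterwards by pure lookups.
import Mathlib
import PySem

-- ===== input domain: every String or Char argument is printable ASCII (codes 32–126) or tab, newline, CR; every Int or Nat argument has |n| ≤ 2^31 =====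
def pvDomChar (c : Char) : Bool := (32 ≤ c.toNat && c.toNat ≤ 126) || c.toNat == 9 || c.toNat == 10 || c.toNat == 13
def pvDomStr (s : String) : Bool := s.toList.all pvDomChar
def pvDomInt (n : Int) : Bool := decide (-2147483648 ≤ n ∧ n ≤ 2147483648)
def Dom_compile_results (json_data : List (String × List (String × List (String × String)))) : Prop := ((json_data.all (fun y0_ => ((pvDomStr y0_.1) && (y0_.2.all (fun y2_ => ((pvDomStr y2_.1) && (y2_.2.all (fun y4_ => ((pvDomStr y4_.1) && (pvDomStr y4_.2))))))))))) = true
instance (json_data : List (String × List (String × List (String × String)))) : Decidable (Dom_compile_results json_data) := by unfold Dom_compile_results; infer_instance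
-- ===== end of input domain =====

-- B replaces A's single nested loop with mutable counters by a staged pipeline:
-- flatten to (principle, status) records, count pairs once, then assemble by lookup
-- (objective: alternative; same asymptotic cost).


-- ===== PORT A =====
-- A's loop body for one process_info (dicts are assoc lists; lookup = first match).
def stepA (st : Int × Int × Int × PySem.Dict String (PySem.Dict String Int))
    (pinfo : List (String × String)) :
    Int × Int × Int × PySem.Dict String (PySem.Dict String Int) :=
  let pk := PySem.Str.strip ((PySem.Dict.mk pinfo).getD "principle_key" "Unknown Principle")
  let ps := if st.2.2.2.contains pk then st.2.2.2 else
    st.2.2.2.insert pk (PySem.Dict.mk [("Yes", (0 : Int)), ("No", 0), ("N/A", 0)])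
  let impl := (PySem.Dict.mk pinfo).getD "implementation" "N/A"
  if impl = "Yes" then
    (st.1 + 1, st.2.1, st.2.2.1, ps.modify pk PySem.Dict.empty (fun inner => inner.modify "Yes" 0 (· + 1)))
  else if impl = "No" then
    (st.1, st.2.1 + 1, st.2.2.1, ps.modify pk PySem.Dict.empty (fun inner => inner.modify "No" 0 (· + 1)))
  else if impl = "N/A" then
    (st.1, st.2.1, st.2.2.1 + 1, ps.modify pk PySem.Dict.empty (fun inner => inner.modify "N/A" 0 (· + 1)))
  else
    (st.1, st.2.1, st.2.2.1, ps)

def compile_results (json_data : List (String × List (String × List (String × String)))) : (List (String × Int)) × (List (String × List (String × Int))) :=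
  let st := json_data.foldl (fun st oc => oc.2.foldl (fun st pr => stepA st pr.2) st)
    (0, 0, 0, PySem.Dict.empty)
  ([("Total Yes", st.1), ("Total No", st.2.1), ("Total N/A", st.2.2.1)],
   st.2.2.2.items.map (fun p => (p.1, p.2.items)))

-- ===== PORT B =====
-- one record of B's flattening comprehension
def recordOf (pinfo : List (String × String)) : String × String :=
  (PySem.Str.strip ((PySem.Dict.mk pinfo).getD "principle_key" "Unknown Principle"),
   (PySem.Dict.mk pinfo).getD "implementation" "N/A")

def recordsOf (json_data : List (String × List (String × List (String × String)))) :
    List (String × String) :=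
  json_data.flatMap (fun oc => oc.2.map (fun pr => recordOf pr.2))

-- pair_counts[rec] = pair_counts.get(rec, 0) + 1
def pairCounts (rs : List (String × String)) : PySem.Dict (String × String) Int :=
  rs.foldl (fun d r => d.insert r (d.getD r 0 + 1)) PySem.Dict.empty

-- first-appearance order of principle keys
def orderB (rs : List (String × String)) : List String :=
  rs.foldl (fun o r => if o.contains r.1 then o else o ++ [r.1]) []

def compile_results_alt (json_data : List (String × List (String × List (String × String)))) : (List (String × Int)) × (List (String × List (String × Int))) :=
  let rs := recordsOf json_data
  let cnt := pairCounts rs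
  ([("Total Yes", ((rs.filter (fun r => r.2 == "Yes")).length : Int)),
    ("Total No", ((rs.filter (fun r => r.2 == "No")).length : Int)),
    ("Total N/A", ((rs.filter (fun r => r.2 == "N/A")).length : Int))],
   (orderB rs).map (fun pk =>
     (pk, [("Yes", cnt.getD (pk, "Yes") 0), ("No", cnt.getD (pk, "No") 0),
           ("N/A", cnt.getD (pk, "N/A") 0)])))

-- ===== PRECONDITION & SPEC =====
def Spec_compile_results (json_data : List (String × List (String × List (String × String)))) (out : (List (String × Int)) × (List (String × List (String × Int)))) : Prop := out = compile_results_alt json_data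
instance (json_data : List (String × List (String × List (String × String)))) (out : (List (String × Int)) × (List (String × List (String × Int)))) : Decidable (Spec_compile_results json_data out) := by unfold Spec_compile_results; infer_instance

-- ===== CLAIM (what is proved, stated in full; the proofs are below) =====
def Claim_equal_compile_results : Prop := ∀ (json_data : List (String × List (String × List (String × String)))), Dom_compile_results json_data → Spec_compile_results json_data (compile_results json_data)

-- ===== LEMMAS AND PROOFS =====

-- A's loop body expressed on the flattened record (same computation, record precomputed)
def stepR (st : Int × Int × Int × PySem.Dict String (PySem.Dict String Int))
    (r : String × String) :
    Int × Int × Int × PySem.Dict String (PySem.Dict String Int) :=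
  let ps := if st.2.2.2.contains r.1 then st.2.2.2 else
    st.2.2.2.insert r.1 (PySem.Dict.mk [("Yes", (0 : Int)), ("No", 0), ("N/A", 0)])
  if r.2 = "Yes" then
    (st.1 + 1, st.2.1, st.2.2.1, ps.modify r.1 PySem.Dict.empty (fun inner => inner.modify "Yes" 0 (· + 1)))
  else if r.2 = "No" then
    (st.1, st.2.1 + 1, st.2.2.1, ps.modify r.1 PySem.Dict.empty (fun inner => inner.modify "No" 0 (· + 1)))
  else if r.2 = "N/A" then
    (st.1, st.2.1, st.2.2.1 + 1, ps.modify r.1 PySem.Dict.empty (fun inner => inner.modify "N/A" 0 (· + 1)))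
  else
    (st.1, st.2.1, st.2.2.1, ps)

lemma stepA_eq_stepR (st : Int × Int × Int × PySem.Dict String (PySem.Dict String Int))
    (pinfo : List (String × String)) : stepA st pinfo = stepR st (recordOf pinfo) := rfl

-- A's nested loop = one fold of stepR over the flattened records
lemma fold_flatten (jd : List (String × List (String × List (String × String)))) :
    ∀ st, jd.foldl (fun st oc => oc.2.foldl (fun st pr => stepA st pr.2) st) st
      = (recordsOf jd).foldl stepR st := by
  induction jd with
  | nil => intro st; rfl
  | cons oc t ih =>
    intro st
    simp only [List.foldl_cons, recordsOf, List.flatMap_cons, List.foldl_append, ih]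
    congr 1
    simp only [stepA_eq_stepR]
    rw [List.foldl_map]

-- abstract model of A's principle_stats: list of (key, yes, no, na) in insertion order
def bumpE (s : String) (e : String × Int × Int × Int) : String × Int × Int × Int :=
  if s = "Yes" then (e.1, e.2.1 + 1, e.2.2.1, e.2.2.2)
  else if s = "No" then (e.1, e.2.1, e.2.2.1 + 1, e.2.2.2)
  else if s = "N/A" then (e.1, e.2.1, e.2.2.1, e.2.2.2 + 1)
  else e

def astep (l : List (String × Int × Int × Int)) (r : String × String) :
    List (String × Int × Int × Int) :=
  (if (l.map Prod.fst).contains r.1 then l else l ++ [(r.1, 0, 0, 0)]).map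
    (fun e => if e.1 = r.1 then bumpE r.2 e else e)

def reify (l : List (String × Int × Int × Int)) : List (String × PySem.Dict String Int) :=
  l.map (fun e => (e.1, PySem.Dict.mk [("Yes", e.2.1), ("No", e.2.2.1), ("N/A", e.2.2.2)]))

def statusCnt (rs : List (String × String)) (k s : String) : Int := (rs.count (k, s) : Int)

def addC (rs : List (String × String)) (e : String × Int × Int × Int) :
    String × Int × Int × Int :=
  (e.1, e.2.1 + statusCnt rs e.1 "Yes", e.2.2.1 + statusCnt rs e.1 "No",
   e.2.2.2 + statusCnt rs e.1 "N/A")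

def newKeys : List (String × String) → List String → List String
  | [], _ => []
  | r :: rs, excl =>
    if excl.contains r.1 then newKeys rs excl else r.1 :: newKeys rs (r.1 :: excl)

lemma fst_bumpE (s : String) (e : String × Int × Int × Int) : (bumpE s e).1 = e.1 := by
  unfold bumpE; split_ifs <;> rfl

lemma keys_astep (l : List (String × Int × Int × Int)) (r : String × String) :
    (astep l r).map Prod.fst
      = if (l.map Prod.fst).contains r.1 then l.map Prod.fst
        else l.map Prod.fst ++ [r.1] := by
  unfold astep
  have h : ∀ m : List (String × Int × Int × Int),
      (m.map (fun e => if e.1 = r.1 then bumpE r.2 e else e)).map Prod.fst = m.map Prod.fst := by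
    intro m
    rw [List.map_map]
    apply List.map_congr_left
    intro e _
    by_cases he : e.1 = r.1 <;> simp [he, fst_bumpE]
  split_ifs with hc <;> simp [h, fst_bumpE]

lemma keys_reify (l : List (String × Int × Int × Int)) :
    (reify l).map Prod.fst = l.map Prod.fst := by
  simp [reify, List.map_map, Function.comp]

lemma containsD (l : List (String × Int × Int × Int)) (k : String) :
    (PySem.Dict.mk (reify l)).contains k = (l.map Prod.fst).contains k := by
  rw [Bool.eq_iff_iff, PySem.Dict.contains_iff_mem_keys]
  have hk : (PySem.Dict.mk (reify l)).keys = l.map Prod.fst := keys_reify l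
  rw [hk, List.contains_iff_mem]

lemma bumpE_other (s : String) (e : String × Int × Int × Int)
    (h1 : s ≠ "Yes") (h2 : s ≠ "No") (h3 : s ≠ "N/A") : bumpE s e = e := by
  unfold bumpE; simp [h1, h2, h3]

lemma step_sim (y n a : Int) (l : List (String × Int × Int × Int))
    (hnd : (l.map Prod.fst).Nodup) (r : String × String) :
    stepR (y, n, a, PySem.Dict.mk (reify l)) r
      = (y + (if r.2 = "Yes" then 1 else 0), n + (if r.2 = "No" then 1 else 0),
         a + (if r.2 = "N/A" then 1 else 0), PySem.Dict.mk (reify (astep l r))) := by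
  simp only [stepR]
  set l' : List (String × Int × Int × Int) :=
    if (l.map Prod.fst).contains r.1 then l else l ++ [(r.1, (0 : Int), (0 : Int), (0 : Int))]
    with hl'
  have hastep : astep l r = l'.map (fun e => if e.1 = r.1 then bumpE r.2 e else e) := by
    unfold astep; rw [← hl']
  have hps : (if (PySem.Dict.mk (reify l)).contains r.1 then PySem.Dict.mk (reify l) else
      (PySem.Dict.mk (reify l)).insert r.1 (PySem.Dict.mk [("Yes", (0 : Int)), ("No", 0), ("N/A", 0)]))
      = PySem.Dict.mk (reify l') := by
    by_cases hc : (l.map Prod.fst).contains r.1 = true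
    · rw [if_pos (by rw [containsD]; exact hc), hl', if_pos hc]
    · have hcf : (l.map Prod.fst).contains r.1 = false := by simpa using hc
      have hcd : (PySem.Dict.mk (reify l)).contains r.1 = false := by rw [containsD, hcf]
      rw [if_neg (by simp [hcd]), hl', if_neg hc]
      apply PySem.Dict.ext
      rw [PySem.Dict.items_insert_of_not_contains _ _ hcd]
      simp [reify]
  have hkey : r.1 ∈ l'.map Prod.fst := by
    rw [hl']; split_ifs with hc
    · simpa [List.contains_iff_mem] using hc
    · simp
  have hnd' : (l'.map Prod.fst).Nodup := by
    rw [hl']; split_ifs with hc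
    · exact hnd
    · simp only [List.map_append]
      refine List.Nodup.append hnd (by simp) ?_
      intro x hx hx'
      simp only [List.map_cons, List.map_nil, List.mem_singleton] at hx'
      subst hx'
      have : r.1 ∉ l.map Prod.fst := by simpa [List.contains_iff_mem] using hc
      exact this hx
  obtain ⟨e0, he0, he01⟩ := List.mem_map.mp hkey
  have hmem : (r.1, PySem.Dict.mk [("Yes", e0.2.1), ("No", e0.2.2.1), ("N/A", e0.2.2.2)])
      ∈ (PySem.Dict.mk (reify l')).items := by
    show _ ∈ reify l'
    exact List.mem_map.mpr ⟨e0, he0, by rw [he01]⟩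
  have hndk : (PySem.Dict.mk (reify l')).keys.Nodup := by
    show ((reify l').map Prod.fst).Nodup
    rw [keys_reify]; exact hnd'
  have hgetD : (PySem.Dict.mk (reify l')).getD r.1 PySem.Dict.empty
      = PySem.Dict.mk [("Yes", e0.2.1), ("No", e0.2.2.1), ("N/A", e0.2.2.2)] :=
    PySem.Dict.getD_of_mem_items _ hmem hndk PySem.Dict.empty
  have hcd' : (PySem.Dict.mk (reify l')).contains r.1 = true := by
    rw [containsD]; simpa [List.contains_iff_mem] using hkey
  have hmod : ∀ s : String, s = "Yes" ∨ s = "No" ∨ s = "N/A" →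
      (PySem.Dict.mk (reify l')).modify r.1 PySem.Dict.empty (fun inner => inner.modify s 0 (· + 1))
        = PySem.Dict.mk (reify (l'.map (fun e => if e.1 = r.1 then bumpE s e else e))) := by
    intro s hs
    have hdef : (PySem.Dict.mk (reify l')).modify r.1 PySem.Dict.empty
        (fun inner => inner.modify s 0 (· + 1))
        = (PySem.Dict.mk (reify l')).insert r.1
            (((PySem.Dict.mk (reify l')).getD r.1 PySem.Dict.empty).modify s 0 (· + 1)) := rfl
    rw [hdef, hgetD]
    apply PySem.Dict.ext
    rw [PySem.Dict.items_insert_of_contains _ _ hcd']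
    show (reify l').map _ = reify _
    unfold reify
    rw [List.map_map, List.map_map]
    apply List.map_congr_left
    intro e he
    by_cases hr : e.1 = r.1
    · have heq : e = e0 := List.inj_on_of_nodup_map hnd' he he0 (by rw [hr, he01])
      subst heq
      rcases hs with h | h | h <;> subst h <;>
        simp [Function.comp, hr, bumpE] <;> rfl
    · have hb : (e.1 == r.1) = false := by simp [hr]
      simp [Function.comp, hb, hr]
  rw [hps, hastep]
  by_cases h1 : r.2 = "Yes"
  · simp only [h1, if_pos]
    rw [hmod "Yes" (Or.inl rfl)]
    simp [h1]
  · by_cases h2 : r.2 = "No"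
    · simp only [h2, if_pos, if_neg h1]
      rw [hmod "No" (Or.inr (Or.inl rfl))]
      simp [h1, h2]
    · by_cases h3 : r.2 = "N/A"
      · simp only [h3, if_pos, if_neg h1, if_neg h2]
        rw [hmod "N/A" (Or.inr (Or.inr rfl))]
        simp [h1, h2, h3]
      · have hid : l'.map (fun e => if e.1 = r.1 then bumpE r.2 e else e) = l' := by
          conv_rhs => rw [← List.map_id l']
          apply List.map_congr_left
          intro e _
          by_cases hr : e.1 = r.1 <;> simp [hr, bumpE_other r.2 e h1 h2 h3]
        rw [hid]
        simp [h1, h2, h3]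

lemma nodup_astep (l : List (String × Int × Int × Int)) (r : String × String)
    (hnd : (l.map Prod.fst).Nodup) : ((astep l r).map Prod.fst).Nodup := by
  rw [keys_astep]
  split_ifs with hc
  · exact hnd
  · refine List.Nodup.append hnd (by simp) ?_
    intro x hx hx'
    simp only [List.mem_singleton] at hx'
    subst hx'
    have : r.1 ∉ l.map Prod.fst := by simpa using hc
    exact this hx

lemma fold_sim (rs : List (String × String)) :
    ∀ (y n a : Int) (l : List (String × Int × Int × Int)), (l.map Prod.fst).Nodup →
    rs.foldl stepR (y, n, a, PySem.Dict.mk (reify l))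
      = (y + ((rs.filter (fun r => r.2 == "Yes")).length : Int),
         n + ((rs.filter (fun r => r.2 == "No")).length : Int),
         a + ((rs.filter (fun r => r.2 == "N/A")).length : Int),
         PySem.Dict.mk (reify (rs.foldl astep l))) := by
  induction rs with
  | nil => intro y n a l _; simp
  | cons r t ih =>
    intro y n a l hnd
    simp only [List.foldl_cons]
    rw [step_sim y n a l hnd r, ih _ _ _ _ (nodup_astep l r hnd)]
    have hfil : ∀ s : String, ((List.filter (fun x => x.2 == s) (r :: t)).length : Int)
        = (if r.2 = s then 1 else 0) + ((List.filter (fun x => x.2 == s) t).length : Int) := by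
      intro s; by_cases h : r.2 = s <;> simp [List.filter_cons, h] <;> omega
    simp only [hfil, Prod.mk.injEq]
    exact ⟨by ring, by ring, by ring, trivial⟩

-- characterisation of the abstract fold: old entries get per-key counts added,
-- new keys are appended in first-appearance order with their full counts
lemma newKeys_congr (rs : List (String × String)) :
    ∀ e₁ e₂ : List String, (∀ k, k ∈ e₁ ↔ k ∈ e₂) → newKeys rs e₁ = newKeys rs e₂ := by
  induction rs with
  | nil => intro _ _ _; rfl
  | cons r t ih =>
    intro e₁ e₂ h
    have hc : e₁.contains r.1 = e₂.contains r.1 := by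
      have := h r.1
      by_cases hm : r.1 ∈ e₂ <;> simp_all
    unfold newKeys
    rw [hc]
    split_ifs with hm
    · exact ih e₁ e₂ h
    · rw [ih (r.1 :: e₁) (r.1 :: e₂) (by intro k; simp [h k])]

lemma mem_newKeys_not_excl (rs : List (String × String)) :
    ∀ excl k, k ∈ newKeys rs excl → k ∉ excl := by
  induction rs with
  | nil => intro _ _ h; exact absurd h (by simp [newKeys])
  | cons r t ih =>
    intro excl k h
    unfold newKeys at h
    split_ifs at h with hc
    · exact ih excl k h
    · rcases List.mem_cons.mp h with h1 | h1
      · subst h1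
        simpa [List.contains_iff_mem] using hc
      · intro hk
        exact ih (r.1 :: excl) k h1 (List.mem_cons_of_mem _ hk)

lemma statusCnt_cons (r : String × String) (t : List (String × String)) (k s : String) :
    statusCnt (r :: t) k s = statusCnt t k s + (if r = (k, s) then 1 else 0) := by
  by_cases h : r = (k, s) <;> simp [statusCnt, List.count_cons, h] <;> push_cast <;> ring

lemma statusCnt_skip (r : String × String) (t : List (String × String)) (k s : String)
    (hk : k ≠ r.1) : statusCnt (r :: t) k s = statusCnt t k s := by
  rw [statusCnt_cons, if_neg (fun h => hk (by rw [h]))]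
  ring

lemma addC_bump (t : List (String × String)) (r : String × String)
    (e : String × Int × Int × Int) (he : e.1 = r.1) :
    addC t (bumpE r.2 e) = addC (r :: t) e := by
  have hcond : ∀ s : String, (r = (e.1, s)) ↔ r.2 = s := by
    intro s; simp [Prod.ext_iff, he]
  unfold addC bumpE
  simp only [statusCnt_cons, hcond]
  by_cases h1 : r.2 = "Yes"
  · simp only [h1, if_pos]
    simp [Prod.ext_iff]
    omega
  · by_cases h2 : r.2 = "No"
    · simp only [h2, if_pos, if_neg h1]
      simp [Prod.ext_iff, h1]
      omega
    · by_cases h3 : r.2 = "N/A"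
      · simp only [h3, if_pos, if_neg h1, if_neg h2]
        simp [Prod.ext_iff, h1]
        omega
      · simp [h1, h2, h3]

lemma addC_skip (t : List (String × String)) (r : String × String)
    (e : String × Int × Int × Int) (he : e.1 ≠ r.1) :
    addC (r :: t) e = addC t e := by
  unfold addC
  rw [statusCnt_skip r t e.1 "Yes" he, statusCnt_skip r t e.1 "No" he,
    statusCnt_skip r t e.1 "N/A" he]

lemma astep_fold_char (rs : List (String × String)) :
    ∀ l, rs.foldl astep l
      = l.map (addC rs)
        ++ (newKeys rs (l.map Prod.fst)).map
            (fun k => (k, statusCnt rs k "Yes", statusCnt rs k "No", statusCnt rs k "N/A")) := by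
  induction rs with
  | nil =>
    intro l
    simp only [List.foldl_nil, newKeys, List.map_nil, List.append_nil]
    conv_lhs => rw [← List.map_id l]
    apply List.map_congr_left
    intro e _
    simp [addC, statusCnt]
  | cons r t ih =>
    intro l
    simp only [List.foldl_cons]
    rw [ih (astep l r), keys_astep]
    by_cases hc : (l.map Prod.fst).contains r.1 = true
    · have hmem : r.1 ∈ l.map Prod.fst := by simpa [List.contains_iff_mem] using hc
      rw [if_pos hc]
      have hmap : (astep l r).map (addC t) = l.map (addC (r :: t)) := by
        unfold astep
        rw [if_pos hc, List.map_map]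
        apply List.map_congr_left
        intro e _
        by_cases hr : e.1 = r.1
        · simp only [Function.comp, hr, if_pos]
          exact addC_bump t r e hr
        · simp only [Function.comp, hr, if_false]
          exact (addC_skip t r e hr).symm
      have hnk : newKeys (r :: t) (l.map Prod.fst) = newKeys t (l.map Prod.fst) := by
        rw [show newKeys (r :: t) (l.map Prod.fst)
            = if (l.map Prod.fst).contains r.1 then newKeys t (l.map Prod.fst)
              else r.1 :: newKeys t (r.1 :: l.map Prod.fst) from rfl, if_pos hc]
      rw [hmap, hnk]
      congr 1
      apply List.map_congr_left
      intro k hk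
      have hkr : k ≠ r.1 := fun h =>
        mem_newKeys_not_excl t _ k hk (by rw [h]; exact hmem)
      rw [statusCnt_skip r t k "Yes" hkr, statusCnt_skip r t k "No" hkr,
        statusCnt_skip r t k "N/A" hkr]
    · have hnmem : r.1 ∉ l.map Prod.fst := by simpa [List.contains_iff_mem] using hc
      have hcf : (l.map Prod.fst).contains r.1 = false := by simpa using hc
      rw [if_neg hc]
      have hastep : astep l r = l ++ [bumpE r.2 (r.1, 0, 0, 0)] := by
        unfold astep
        rw [if_neg hc, List.map_append]
        have h1 : l.map (fun e => if e.1 = r.1 then bumpE r.2 e else e) = l := by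
          conv_rhs => rw [← List.map_id l]
          apply List.map_congr_left
          intro e hel
          rw [if_neg (fun h => hnmem (List.mem_map.mpr ⟨e, hel, h⟩))]
          rfl
        rw [h1]
        simp
      rw [hastep, List.map_append]
      have hnk : newKeys t (l.map Prod.fst ++ [r.1]) = newKeys t (r.1 :: l.map Prod.fst) :=
        newKeys_congr t _ _ (by intro k; simp [or_comm])
      rw [hnk]
      have hnk2 : newKeys (r :: t) (l.map Prod.fst) = r.1 :: newKeys t (r.1 :: l.map Prod.fst) := by
        rw [show newKeys (r :: t) (l.map Prod.fst)
            = if (l.map Prod.fst).contains r.1 then newKeys t (l.map Prod.fst)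
              else r.1 :: newKeys t (r.1 :: l.map Prod.fst) from rfl, if_neg hc]
      rw [hnk2]
      have hl : l.map (addC t) = l.map (addC (r :: t)) := by
        apply List.map_congr_left
        intro e hel
        exact (addC_skip t r e (fun h => hnmem (h ▸ List.mem_map_of_mem hel))).symm
      rw [hl]
      have hhead : addC t (bumpE r.2 (r.1, 0, 0, 0))
          = (r.1, statusCnt (r :: t) r.1 "Yes", statusCnt (r :: t) r.1 "No",
             statusCnt (r :: t) r.1 "N/A") := by
        rw [addC_bump t r (r.1, 0, 0, 0) rfl]
        simp [addC]
      have htail : (newKeys t (r.1 :: l.map Prod.fst)).map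
            (fun k => (k, statusCnt t k "Yes", statusCnt t k "No", statusCnt t k "N/A"))
          = (newKeys t (r.1 :: l.map Prod.fst)).map
            (fun k => (k, statusCnt (r :: t) k "Yes", statusCnt (r :: t) k "No",
                       statusCnt (r :: t) k "N/A")) := by
        apply List.map_congr_left
        intro k hk
        have hkr : k ≠ r.1 := fun h =>
          mem_newKeys_not_excl t _ k hk (by rw [h]; exact List.mem_cons_self)
        rw [statusCnt_skip r t k "Yes" hkr, statusCnt_skip r t k "No" hkr,
          statusCnt_skip r t k "N/A" hkr]
      simp only [List.map_cons, List.map_nil]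
      rw [hhead, htail]
      simp



lemma orderB_eq_newKeys (rs : List (String × String)) :
    ∀ o : List String, rs.foldl (fun o r => if o.contains r.1 then o else o ++ [r.1]) o
      = o ++ newKeys rs o := by
  induction rs with
  | nil => intro o; simp [newKeys]
  | cons r t ih =>
    intro o
    simp only [List.foldl_cons]
    unfold newKeys
    split_ifs with hc
    · exact ih o
    · rw [ih (o ++ [r.1]),
        newKeys_congr t (o ++ [r.1]) (r.1 :: o) (by intro k; simp [or_comm])]
      simp

-- ===== VERDICT (by name: the statement is the Claim_ definition above) =====
theorem compile_results_spec : Claim_equal_compile_results := by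
  intro jd _
  unfold Spec_compile_results compile_results compile_results_alt
  simp only []
  rw [fold_flatten]
  have h0 : (PySem.Dict.empty : PySem.Dict String (PySem.Dict String Int))
      = PySem.Dict.mk (reify []) := rfl
  rw [h0, fold_sim (recordsOf jd) 0 0 0 [] (by simp [List.map_nil])]
  rw [astep_fold_char (recordsOf jd) []]
  have hcnt : ∀ v : String × String,
      (pairCounts (recordsOf jd)).getD v 0 = ((recordsOf jd).count v : Int) := by
    intro v
    unfold pairCounts
    rw [PySem.Dict.foldl_insert_getD_add_one_eq_counter, PySem.Dict.getD_counter]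
  have horder : orderB (recordsOf jd) = newKeys (recordsOf jd) [] := by
    unfold orderB
    rw [orderB_eq_newKeys (recordsOf jd) [], List.nil_append]
  rw [horder]
  simp only [hcnt, List.map_nil, List.nil_append, zero_add]
  refine Prod.ext rfl ?_
  show (reify _).map _ = _
  simp only [reify, List.map_map]
  apply List.map_congr_left
  intro k _
  simp [statusCnt]
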